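-- pv_equiv track=rewrite | github.com/fleurvanl/AOC2024 | day05.py | organise_data
-- ===== SOURCE A (Python) =====
-- def organise_data(lines):
--     ordering_rules = []
--     updates = []
--     switch = False
--     for line in lines:
--         if line != '':
--             if not switch:
--                 ordering_rules.append(line.split('|'))
--             else:
--                 updates.append(line)
--         else:
--             switch = True
--     return ordering_rules, updates
-- ===== SOURCE B (Python) =====
-- def organise_data(lines):
--     # partition-then-map: slice around the first blank line instead of a flag-driven loop
--     idx = lines.index('') if '' in lines else len(lines)
--     before = lines[:idx]
--     after = lines[idx + 1:]
--     ordering_rules = [l.split('|') for l in before if l != '']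
--     updates = [l for l in after if l != '']
--     return ordering_rules, updates
-- ===== Notes on version B (the rewrite author's own statement) =====
-- stated objective: simpler
-- what changed: Replaces the flag-driven state-machine loop by locating the first blank line and slicing the input into a before/after part, then mapping split over one and filtering the other.
import Mathlib
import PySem

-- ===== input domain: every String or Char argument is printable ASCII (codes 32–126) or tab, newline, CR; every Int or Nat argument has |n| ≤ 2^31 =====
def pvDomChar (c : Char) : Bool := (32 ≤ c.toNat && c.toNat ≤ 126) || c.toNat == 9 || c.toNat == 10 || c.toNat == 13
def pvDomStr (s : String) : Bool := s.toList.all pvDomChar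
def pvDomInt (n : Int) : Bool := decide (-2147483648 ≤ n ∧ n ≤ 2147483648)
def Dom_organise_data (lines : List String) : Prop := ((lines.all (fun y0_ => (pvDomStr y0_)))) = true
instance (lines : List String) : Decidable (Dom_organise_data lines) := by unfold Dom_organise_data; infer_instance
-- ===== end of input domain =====

-- B replaces A's flag-driven state-machine loop by partition-then-map: locate the first blank
-- line, slice the input around it, map split over the prefix and filter the suffix (objective: simpler).

-- ===== PORT A =====
-- line.split('|'): '|' is a nonempty literal separator, so split? is always `some`; getD [] is exact here
def pvSplitBar (line : String) : List String := (PySem.Str.split? line "|").getD []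

-- A's loop state: (ordering_rules, updates, switch)
def organise_data (lines : List String) : List (List String) × List String :=
  let st := lines.foldl
    (fun (st : List (List String) × List String × Bool) line =>
      if line ≠ "" then
        if !st.2.2 then (st.1 ++ [pvSplitBar line], st.2.1, st.2.2)
        else (st.1, st.2.1 ++ [line], st.2.2)
      else (st.1, st.2.1, true))
    ([], [], false)
  (st.1, st.2.1)

-- ===== PORT B =====
def organise_data_alt (lines : List String) : List (List String) × List String :=
  let idx : Nat := match PySem.List.index? lines "" with
    | some i => i
    | none => lines.length
  let before := PySem.List.slice lines none (some (idx : Int))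
  let after := PySem.List.slice lines (some ((idx : Int) + 1)) none
  ((before.filter (fun l => l ≠ "")).map pvSplitBar,
   after.filter (fun l => l ≠ ""))

-- ===== PRECONDITION & SPEC =====
def Spec_organise_data (lines : List String) (out : List (List String) × List String) : Prop := out = organise_data_alt lines
instance (lines : List String) (out : List (List String) × List String) : Decidable (Spec_organise_data lines out) := by unfold Spec_organise_data; infer_instance

-- ===== CLAIM (what is proved, stated in full; the proofs are below) =====
def Claim_equal_organise_data : Prop := ∀ (lines : List String), Dom_organise_data lines → Spec_organise_data lines (organise_data lines)

-- ===== LEMMAS AND PROOFS =====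

-- B's port in equational form
theorem alt_nil : organise_data_alt [] = ([], []) := by decide

theorem alt_cons_blank (rest : List String) :
    organise_data_alt ("" :: rest) = ([], rest.filter (fun l => l ≠ "")) := by
  unfold organise_data_alt
  rw [PySem.List.index?_cons_self]
  dsimp only
  rw [PySem.List.slice_to_natCast, show (((0:Nat):Int)+1 = ((1:Nat):Int)) by norm_num, PySem.List.slice_from_natCast]
  simp

theorem alt_cons_ne (l : String) (rest : List String) (h : l ≠ "") :
    organise_data_alt (l :: rest) =
      (pvSplitBar l :: (organise_data_alt rest).1, (organise_data_alt rest).2) := by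
  unfold organise_data_alt
  have hcons := PySem.List.index?_cons_of_ne (x := l) (xs := rest) (v := "") h
  rw [hcons]
  cases hidx : PySem.List.index? rest "" with
  | none =>
      simp only [Option.map_none]
      have e1 : ((((l :: rest).length : Nat) : Int)) = (((rest.length + 1 : Nat)) : Int) := by
        simp [List.length_cons]
      rw [e1, PySem.List.slice_to_natCast]
      have e2 : (((rest.length + 1 : Nat)) : Int) + 1 = (((rest.length + 2 : Nat)) : Int) := by
        push_cast; ring
      have e3 : ((rest.length : Nat) : Int) + 1 = (((rest.length + 1 : Nat)) : Int) := by
        push_cast; ring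
      rw [e2, PySem.List.slice_from_natCast, e3,
        PySem.List.slice_to_natCast, PySem.List.slice_from_natCast]
      simp [List.take_of_length_le, List.drop_of_length_le, h]
  | some i =>
      simp only [Option.map_some]
      have e2 : (((i + 1 : Nat)) : Int) + 1 = (((i + 2 : Nat)) : Int) := by
        push_cast; ring
      have e3 : ((i : Nat) : Int) + 1 = (((i + 1 : Nat)) : Int) := by
        push_cast; ring
      rw [e2, PySem.List.slice_to_natCast, PySem.List.slice_from_natCast, e3,
        PySem.List.slice_to_natCast, PySem.List.slice_from_natCast]
      simp [List.take_succ_cons, h]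

-- A's loop body, named for the lemmas
def pvStepA (st : List (List String) × List String × Bool) (line : String) :
    List (List String) × List String × Bool :=
  if line ≠ "" then
    if !st.2.2 then (st.1 ++ [pvSplitBar line], st.2.1, st.2.2)
    else (st.1, st.2.1 ++ [line], st.2.2)
  else (st.1, st.2.1, true)

theorem loop_switched (rest : List String) (r : List (List String)) (u : List String) :
    rest.foldl pvStepA (r, u, true) = (r, u ++ rest.filter (fun l => l ≠ ""), true) := by
  induction rest generalizing u with
  | nil => simp
  | cons x xs ih =>
      by_cases hx : x = ""
      · subst hx; simp [pvStepA, ih]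
      · simp [pvStepA, hx, ih]

theorem loop_main (lines : List String) (r : List (List String)) :
    lines.foldl pvStepA (r, [], false) =
      (r ++ (organise_data_alt lines).1, (organise_data_alt lines).2,
        (lines.foldl pvStepA (r, [], false)).2.2) := by
  induction lines generalizing r with
  | nil => simp [alt_nil]
  | cons x xs ih =>
      by_cases hx : x = ""
      · subst hx
        simp only [List.foldl_cons]
        have : pvStepA (r, [], false) "" = (r, [], true) := by simp [pvStepA]
        rw [this, loop_switched, alt_cons_blank]
        simp
      · simp only [List.foldl_cons]
        have : pvStepA (r, [], false) x = (r ++ [pvSplitBar x], [], false) := by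
          simp [pvStepA, hx]
        rw [this, ih, alt_cons_ne x xs hx]
        simp

-- ===== VERDICT (by name: the statement is the Claim_ definition above) =====
theorem organise_data_spec : Claim_equal_organise_data := by
  intro lines _
  unfold Spec_organise_data organise_data
  have h : lines.foldl pvStepA ([], [], false) =
      ([] ++ (organise_data_alt lines).1, (organise_data_alt lines).2,
        (lines.foldl pvStepA (([] : List (List String)), [], false)).2.2) :=
    loop_main lines []
  show (let st := lines.foldl pvStepA ([], [], false); (st.1, st.2.1)) = _
  rw [h]
  simp
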